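-- pv_equiv track=rewrite | github.com/Construkted-Reality/content-marketing-02 | 02_generate_blog_drafts.py | get_batch_diversity_context
-- ===== SOURCE A (Python) =====
-- def get_batch_diversity_context(processed_ideas: list) -> str:
--     """Generate context about previous selections to encourage diversity."""
--     if not processed_ideas:
--         return ""
--
--     # Extract previous selections
--     voices = [idea.get('voice', '') for idea in processed_ideas if idea.get('voice')]
--     piece_types = [idea.get('piece_type', '') for idea in processed_ideas if idea.get('piece_type')]
--     marketing_types = [idea.get('marketing_post_type', '') for idea in processed_ideas if idea.get('marketing_post_type')]
--     goals = [idea.get('primary_goal', '') for idea in processed_ideas if idea.get('primary_goal')]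
--     audiences = [idea.get('target_audience', '') for idea in processed_ideas if idea.get('target_audience')]
--
--     context_parts = []
--     if voices:
--         context_parts.append(f"Previous voices used: {', '.join(voices)}")
--     if piece_types:
--         context_parts.append(f"Previous piece types: {', '.join(piece_types)}")
--     if marketing_types:
--         context_parts.append(f"Previous marketing types: {', '.join(marketing_types)}")
--     if goals:
--         context_parts.append(f"Previous goals: {', '.join(goals)}")
--     if audiences:
--         context_parts.append(f"Previous audiences: {', '.join(audiences)}")
--
--     if context_parts:
--         return f"\n**BATCH DIVERSITY CONTEXT**: {'; '.join(context_parts)}. Aim for diversity in your selections unless the content strongly suggests otherwise.\n"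
--     return ""
-- ===== SOURCE B (Python) =====
-- FIELDS = [
--     ("voice", "Previous voices used"),
--     ("piece_type", "Previous piece types"),
--     ("marketing_post_type", "Previous marketing types"),
--     ("primary_goal", "Previous goals"),
--     ("target_audience", "Previous audiences"),
-- ]
--
-- def get_batch_diversity_context(processed_ideas: list) -> str:
--     """Generate context about previous selections to encourage diversity."""
--     if not processed_ideas:
--         return ""
--
--     # one pass over the ideas, accumulating every field at once (parallel to FIELDS)
--     accs = [[] for _ in FIELDS]
--     for idea in processed_ideas:
--         accs = [acc + [idea[key]] if idea.get(key) else acc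
--                 for acc, (key, _) in zip(accs, FIELDS)]
--
--     context_parts = [f"{label}: {', '.join(values)}"
--                      for values, (_, label) in zip(accs, FIELDS) if values]
--
--     if context_parts:
--         return f"\n**BATCH DIVERSITY CONTEXT**: {'; '.join(context_parts)}. Aim for diversity in your selections unless the content strongly suggests otherwise.\n"
--     return ""
-- ===== Notes on version B (the rewrite author's own statement) =====
-- stated objective: simpler
-- what changed: Replaces five separate filtered comprehensions over processed_ideas (one per field) by a data-driven table of (key, label) pairs and a single pass that accumulates all five fields at once, then one table-driven loop that emits the non-empty sections.
import Mathlib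
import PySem

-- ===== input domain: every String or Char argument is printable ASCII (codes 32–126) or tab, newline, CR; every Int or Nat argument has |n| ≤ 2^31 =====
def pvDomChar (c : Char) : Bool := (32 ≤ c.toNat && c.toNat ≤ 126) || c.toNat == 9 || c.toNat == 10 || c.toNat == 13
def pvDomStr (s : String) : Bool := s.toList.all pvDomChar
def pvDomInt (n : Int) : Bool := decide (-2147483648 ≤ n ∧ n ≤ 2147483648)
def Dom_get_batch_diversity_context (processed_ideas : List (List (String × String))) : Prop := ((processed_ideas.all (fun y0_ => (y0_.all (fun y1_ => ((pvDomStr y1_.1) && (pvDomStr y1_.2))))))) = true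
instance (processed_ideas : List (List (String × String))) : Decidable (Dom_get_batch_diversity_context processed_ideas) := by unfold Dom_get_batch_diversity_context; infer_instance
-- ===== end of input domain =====

-- B is a simpler, table-driven single pass over the ideas; equivalence of the RETURN value is proved.

-- ===== PORT A =====
-- [idea.get(k, '') for idea in processed_ideas if idea.get(k)] : filter by truthiness, then map the lookup
def pvCompA (processed_ideas : List (List (String × String))) (k : String) : List String :=
  (processed_ideas.filter
      (fun idea => ((PySem.Dict.mk idea).get? k).getD "" ≠ "")).map
    (fun idea => (PySem.Dict.mk idea).getD k "")

def get_batch_diversity_context (processed_ideas : List (List (String × String))) : String :=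
  if processed_ideas = [] then ""
  else
    let voices := pvCompA processed_ideas "voice"
    let piece_types := pvCompA processed_ideas "piece_type"
    let marketing_types := pvCompA processed_ideas "marketing_post_type"
    let goals := pvCompA processed_ideas "primary_goal"
    let audiences := pvCompA processed_ideas "target_audience"
    let cp0 : List String := []
    let cp1 := if voices ≠ [] then cp0 ++ ["Previous voices used: " ++ PySem.Str.join ", " voices] else cp0
    let cp2 := if piece_types ≠ [] then cp1 ++ ["Previous piece types: " ++ PySem.Str.join ", " piece_types] else cp1
    let cp3 := if marketing_types ≠ [] then cp2 ++ ["Previous marketing types: " ++ PySem.Str.join ", " marketing_types] else cp2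
    let cp4 := if goals ≠ [] then cp3 ++ ["Previous goals: " ++ PySem.Str.join ", " goals] else cp3
    let cp5 := if audiences ≠ [] then cp4 ++ ["Previous audiences: " ++ PySem.Str.join ", " audiences] else cp4
    if cp5 ≠ [] then
      "\n**BATCH DIVERSITY CONTEXT**: " ++ PySem.Str.join "; " cp5 ++
        ". Aim for diversity in your selections unless the content strongly suggests otherwise.\n"
    else ""

-- ===== PORT B =====
def pvFIELDS : List (String × String) :=
  [("voice", "Previous voices used"),
   ("piece_type", "Previous piece types"),
   ("marketing_post_type", "Previous marketing types"),
   ("primary_goal", "Previous goals"),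
   ("target_audience", "Previous audiences")]

def get_batch_diversity_context_alt (processed_ideas : List (List (String × String))) : String :=
  if processed_ideas = [] then ""
  else
    let accs := processed_ideas.foldl
      (fun accs idea =>
        (accs.zip pvFIELDS).map (fun p =>
          if ((PySem.Dict.mk idea).get? p.2.1).getD "" ≠ ""
          then p.1 ++ [((PySem.Dict.mk idea).get? p.2.1).getD ""]
          else p.1))
      (pvFIELDS.map (fun _ => []))
    let context_parts := (accs.zip pvFIELDS).filterMap (fun p =>
      if p.1 ≠ [] then some (p.2.2 ++ ": " ++ PySem.Str.join ", " p.1) else none)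
    if context_parts ≠ [] then
      "\n**BATCH DIVERSITY CONTEXT**: " ++ PySem.Str.join "; " context_parts ++
        ". Aim for diversity in your selections unless the content strongly suggests otherwise.\n"
    else ""

-- ===== PRECONDITION & SPEC =====
def Spec_get_batch_diversity_context (processed_ideas : List (List (String × String))) (out : String) : Prop := out = get_batch_diversity_context_alt processed_ideas
instance (processed_ideas : List (List (String × String))) (out : String) : Decidable (Spec_get_batch_diversity_context processed_ideas out) := by unfold Spec_get_batch_diversity_context; infer_instance

-- ===== CLAIM (what is proved, stated in full; the proofs are below) =====
def Claim_equal_get_batch_diversity_context : Prop := ∀ (processed_ideas : List (List (String × String))), Dom_get_batch_diversity_context processed_ideas → Spec_get_batch_diversity_context processed_ideas (get_batch_diversity_context processed_ideas)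

-- ===== LEMMAS AND PROOFS =====

-- one idea's contribution to field k
def pvDelta (idea : List (String × String)) (k : String) : List String :=
  if ((PySem.Dict.mk idea).get? k).getD "" ≠ "" then [((PySem.Dict.mk idea).get? k).getD ""] else []

theorem pvCompA_cons (idea : List (String × String)) (rest : List (List (String × String))) (k : String) :
    pvCompA (idea :: rest) k = pvDelta idea k ++ pvCompA rest k := by
  simp only [pvCompA, pvDelta, List.filter_cons]
  by_cases h : ((PySem.Dict.mk idea).get? k).getD "" ≠ "" <;>
    simp [h, PySem.Dict.getD_eq_get?_getD]

theorem pvFold_eq (processed_ideas : List (List (String × String))) (f : String × String → List String) :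
    processed_ideas.foldl
      (fun accs idea =>
        (accs.zip pvFIELDS).map (fun p =>
          if ((PySem.Dict.mk idea).get? p.2.1).getD "" ≠ ""
          then p.1 ++ [((PySem.Dict.mk idea).get? p.2.1).getD ""]
          else p.1))
      (pvFIELDS.map f)
    = pvFIELDS.map (fun kl => f kl ++ pvCompA processed_ideas kl.1) := by
  induction processed_ideas generalizing f with
  | nil => simp [pvCompA]
  | cons idea rest ih =>
    rw [List.foldl_cons]
    have step : (( (pvFIELDS.map f).zip pvFIELDS).map (fun p =>
          if ((PySem.Dict.mk idea).get? p.2.1).getD "" ≠ ""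
          then p.1 ++ [((PySem.Dict.mk idea).get? p.2.1).getD ""]
          else p.1))
        = pvFIELDS.map (fun kl => f kl ++ pvDelta idea kl.1) := by
      simp [pvFIELDS, pvDelta]
      constructor <;> [skip; constructor] <;> [skip; skip; constructor] <;>
        [skip; skip; skip; constructor] <;> split <;> simp
    rw [step, ih (fun kl => f kl ++ pvDelta idea kl.1)]
    apply List.map_congr_left
    intro kl _
    rw [pvCompA_cons, List.append_assoc]

-- ===== VERDICT (by name: the statement is the Claim_ definition above) =====
theorem get_batch_diversity_context_spec : Claim_equal_get_batch_diversity_context := by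
  intro pis _
  unfold Spec_get_batch_diversity_context get_batch_diversity_context get_batch_diversity_context_alt
  by_cases h : pis = []
  · simp [h]
  · simp only [h, reduceIte]
    rw [pvFold_eq pis (fun _ => [])]
    simp [pvFIELDS]
    by_cases h1 : pvCompA pis "voice" = [] <;>
    by_cases h2 : pvCompA pis "piece_type" = [] <;>
    by_cases h3 : pvCompA pis "marketing_post_type" = [] <;>
    by_cases h4 : pvCompA pis "primary_goal" = [] <;>
    by_cases h5 : pvCompA pis "target_audience" = [] <;>
      simp [h1, h2, h3, h4, h5]
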